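-- pv_equiv track=rewrite | github.com/viverbungag/Codewars | Count the Digit.py | nb_dig
-- ===== SOURCE A (Python) =====
-- def nb_dig(n, d):
--     # your code
--     ans = 0
--     arr = [x**2 for x in range(n+1)]
--     for x in arr:
--         chck = str(x)
--         for y in chck:
--             if y == str(d):
--                 ans += 1
--
--     return ans
-- ===== SOURCE B (Python) =====
-- def nb_dig(n, d):
--     ans = 0
--     for x in range(n + 1):
--         s = x * x
--         while True:
--             if s % 10 == d:
--                 ans += 1
--             s //= 10
--             if s == 0:
--                 break
--     return ans
-- ===== Notes on version B (the rewrite author's own statement) =====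
-- stated objective: alternative
-- what changed: B drops the intermediate list of squares and the str()-based digit scan: it counts matching digits arithmetically with a do-while over s % 10 / s //= 10, comparing the digit to d as an integer instead of comparing characters to str(d).
import Mathlib
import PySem

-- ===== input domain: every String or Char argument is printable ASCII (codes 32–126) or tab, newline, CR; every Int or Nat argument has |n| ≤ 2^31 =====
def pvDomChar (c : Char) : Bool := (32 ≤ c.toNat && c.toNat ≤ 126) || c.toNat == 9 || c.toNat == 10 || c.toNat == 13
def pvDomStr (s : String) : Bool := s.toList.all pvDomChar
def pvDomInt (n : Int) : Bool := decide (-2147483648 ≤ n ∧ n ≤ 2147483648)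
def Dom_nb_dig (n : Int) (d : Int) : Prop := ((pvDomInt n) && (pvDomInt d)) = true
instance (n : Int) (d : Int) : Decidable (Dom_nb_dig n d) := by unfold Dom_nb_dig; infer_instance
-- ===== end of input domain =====

-- B replaces A's list of squares + string-based digit scan by arithmetic digit extraction (s % 10, s //= 10);
-- equivalence of the two digit counts is proved for every d (single-digit or not).

-- ===== PORT A =====
def nb_dig (n : Int) (d : Int) : Int :=
  let arr := (PySem.List.pyRange 0 (n + 1) 1).map (fun x => x ^ 2)
  arr.foldl (fun ans x =>
    (PySem.Int.toChars x).foldl (fun ans y =>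
      if [y] = PySem.Int.toChars d then ans + 1 else ans) ans) 0

-- ===== PORT B =====
-- B's inner do-while loop; s = x*x is a nonnegative int, carried as its Nat value
-- so the recursion on s / 10 is structural (Python's s //= 10 on s ≥ 0 is Nat division).
def pvDigLoop (s : Nat) (d : Int) (ans : Int) : Int :=
  let ans := if ((s % 10 : Nat) : Int) = d then ans + 1 else ans
  if h : s / 10 = 0 then ans else pvDigLoop (s / 10) d ans
decreasing_by exact Nat.div_lt_self (Nat.pos_of_ne_zero (fun h0 => h (by simp [h0]))) (by norm_num)

def nb_dig_alt (n : Int) (d : Int) : Int :=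
  (PySem.List.pyRange 0 (n + 1) 1).foldl (fun ans x => pvDigLoop (x * x).toNat d ans) 0

-- ===== PRECONDITION & SPEC =====
def Spec_nb_dig (n : Int) (d : Int) (out : Int) : Prop := out = nb_dig_alt n d
instance (n : Int) (d : Int) (out : Int) : Decidable (Spec_nb_dig n d out) := by unfold Spec_nb_dig; infer_instance

-- ===== CLAIM (what is proved, stated in full; the proofs are below) =====
def Claim_equal_nb_dig : Prop := ∀ (n : Int) (d : Int), Dom_nb_dig n d → Spec_nb_dig n d (nb_dig n d)

-- ===== LEMMAS AND PROOFS =====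

-- pure count of digits of m equal to d (proof-side characterisation of both inner loops)
def pvCnt (m : Nat) (d : Int) : Int :=
  (if ((m % 10 : Nat) : Int) = d then 1 else 0) +
  (if h : m / 10 = 0 then 0 else pvCnt (m / 10) d)
decreasing_by exact Nat.div_lt_self (Nat.pos_of_ne_zero (fun h0 => h (by simp [h0]))) (by norm_num)

theorem pvDigLoop_eq (m : Nat) (d : Int) : ∀ (ans : Int), pvDigLoop m d ans = ans + pvCnt m d := by
  induction m using Nat.strong_induction_on with
  | _ m ih =>
    intro ans
    rw [pvDigLoop, pvCnt]
    by_cases h : m / 10 = 0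
    · simp only [h, dif_pos]; split_ifs <;> ring
    · rw [dif_neg h, dif_neg h,
        ih (m / 10) (Nat.div_lt_self (Nat.pos_of_ne_zero (fun h0 => h (by simp [h0]))) (by norm_num))]
      split_ifs <;> ring

-- fuel irrelevance for Nat.toDigitsCore (base 10)
theorem pvCore_fuel (f1 : Nat) : ∀ (f2 m : Nat) (acc : List Char), m < f1 → m < f2 →
    Nat.toDigitsCore 10 f1 m acc = Nat.toDigitsCore 10 f2 m acc := by
  induction f1 with
  | zero => intro f2 m acc h1 _; omega
  | succ s1 ih =>
    intro f2 m acc h1 h2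
    cases f2 with
    | zero => omega
    | succ s2 =>
      simp only [Nat.toDigitsCore]
      by_cases h : m / 10 = 0
      · simp [h]
      · rw [if_neg h, if_neg h]
        have hm : 0 < m := Nat.pos_of_ne_zero (fun h0 => h (by simp [h0]))
        have hlt : m / 10 < m := Nat.div_lt_self hm (by norm_num)
        exact ih s2 (m / 10) _ (by omega) (by omega)

-- toDigitsCore appends its accumulator
theorem pvCore_append (f : Nat) : ∀ (m : Nat) (acc : List Char),
    Nat.toDigitsCore 10 f m acc = Nat.toDigitsCore 10 f m [] ++ acc := by
  induction f with
  | zero => intro m acc; simp [Nat.toDigitsCore]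
  | succ s ih =>
    intro m acc
    simp only [Nat.toDigitsCore]
    by_cases h : m / 10 = 0
    · simp [h]
    · rw [if_neg h, if_neg h, ih (m / 10) (_ :: acc), ih (m / 10) [_]]
      simp

-- structure of Nat.toDigits 10
theorem pvToDigits_small (m : Nat) (h : m / 10 = 0) :
    Nat.toDigits 10 m = [Nat.digitChar (m % 10)] := by
  simp [Nat.toDigits, Nat.toDigitsCore, h]

theorem pvToDigits_step (m : Nat) (h : m / 10 ≠ 0) :
    Nat.toDigits 10 m = Nat.toDigits 10 (m / 10) ++ [Nat.digitChar (m % 10)] := by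
  have hm : 0 < m := Nat.pos_of_ne_zero (fun h0 => h (by simp [h0]))
  have hlt : m / 10 < m := Nat.div_lt_self hm (by norm_num)
  show Nat.toDigitsCore 10 (m + 1) m [] = _
  simp only [Nat.toDigitsCore]
  rw [if_neg h, pvCore_append, pvCore_fuel m (m / 10 + 1) (m / 10) [] (by omega) (by omega)]
  rfl

-- the character test A performs, reduced to the integer test B performs (for a digit r < 10)
theorem pvCharTest (r : Nat) (hr : r < 10) (d : Int) :
    ([Nat.digitChar r] = PySem.Int.toChars d) ↔ (((r : Nat) : Int) = d) := by
  by_cases hd : 0 ≤ d ∧ d < 10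
  · obtain ⟨h0, h1⟩ := hd
    obtain ⟨k, rfl⟩ := Int.eq_ofNat_of_zero_le h0
    have hk : k < 10 := by exact_mod_cast h1
    have : PySem.Int.toChars (k : Int) = [Nat.digitChar k] := by
      simp only [PySem.Int.toChars]
      rw [if_neg (by omega)]
      have : ((k : Int)).toNat = k := rfl
      rw [this, pvToDigits_small k (Nat.div_eq_of_lt hk)]
      rw [Nat.mod_eq_of_lt hk]
    rw [this]
    simp only [List.cons.injEq, and_true, Int.natCast_inj]
    interval_cases r <;> interval_cases k <;> decide
  · have hrd : ¬ (((r : Nat) : Int) = d) := by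
      intro he; apply hd; constructor <;> omega
    rw [iff_false_intro hrd, iff_false]
    intro he
    -- toChars d has length ≥ 2 outside [0, 10): a '-' sign or at least two digits
    have hlen : (PySem.Int.toChars d).length ≠ 1 := by
      by_cases hneg : d < 0
      · simp only [PySem.Int.toChars, if_pos hneg, List.length_cons]
        have : Nat.toDigits 10 d.natAbs ≠ [] := by
          by_cases h : d.natAbs / 10 = 0
          · rw [pvToDigits_small _ h]; simp
          · rw [pvToDigits_step _ h]; simp
        intro hc
        cases hD : Nat.toDigits 10 d.natAbs with
        | nil => exact this hD
        | cons a l => rw [hD] at hc; simp at hc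
      · have hge : 10 ≤ d := by omega
        simp only [PySem.Int.toChars, if_neg (by omega : ¬ d < 0)]
        have hdn : 10 ≤ d.toNat := by omega
        have h10 : d.toNat / 10 ≠ 0 := by
          intro hz; have := Nat.div_eq_zero_iff.mp hz; omega
        rw [pvToDigits_step _ h10, List.length_append]
        have : Nat.toDigits 10 (d.toNat / 10) ≠ [] := by
          by_cases h : d.toNat / 10 / 10 = 0
          · rw [pvToDigits_small _ h]; simp
          · rw [pvToDigits_step _ h]; simp
        have := List.length_pos_iff.mpr this
        simp only [List.length_singleton]
        omega
    apply hlen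
    rw [← he]
    rfl

-- A's inner character loop, starting from ans, adds exactly pvCnt
theorem pvInnerA (m : Nat) (d : Int) : ∀ (ans : Int),
    (Nat.toDigits 10 m).foldl
      (fun ans y => if [y] = PySem.Int.toChars d then ans + 1 else ans) ans
      = ans + pvCnt m d := by
  induction m using Nat.strong_induction_on with
  | _ m ih =>
    intro ans
    rw [pvCnt]
    by_cases h : m / 10 = 0
    · rw [pvToDigits_small m h, dif_pos h]
      simp only [List.foldl_cons, List.foldl_nil]
      simp only [pvCharTest (m % 10) (Nat.mod_lt m (by norm_num)) d]
      split_ifs <;> ring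
    · have hm : 0 < m := Nat.pos_of_ne_zero (fun h0 => h (by simp [h0]))
      have hlt : m / 10 < m := Nat.div_lt_self hm (by norm_num)
      rw [pvToDigits_step m h, dif_neg h, List.foldl_append, ih (m / 10) hlt ans]
      simp only [List.foldl_cons, List.foldl_nil]
      simp only [pvCharTest (m % 10) (Nat.mod_lt m (by norm_num)) d]
      split_ifs <;> ring

-- for nonnegative x, A's inner loop equals B's inner loop
theorem pvInner_eq (x : Int) (hx : 0 ≤ x) (d : Int) (ans : Int) :
    (PySem.Int.toChars (x ^ 2)).foldl
      (fun ans y => if [y] = PySem.Int.toChars d then ans + 1 else ans) ans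
      = pvDigLoop (x * x).toNat d ans := by
  have hsq : 0 ≤ x * x := mul_nonneg hx hx
  have hx2 : x ^ 2 = x * x := sq x
  rw [hx2, pvDigLoop_eq]
  have : PySem.Int.toChars (x * x) = Nat.toDigits 10 (x * x).toNat := by
    simp only [PySem.Int.toChars]
    rw [if_neg (by omega)]
  rw [this, pvInnerA]

-- ===== VERDICT (by name: the statement is the Claim_ definition above) =====
theorem nb_dig_spec : Claim_equal_nb_dig := by
  intro n d _
  show nb_dig n d = nb_dig_alt n d
  unfold nb_dig nb_dig_alt
  rw [List.foldl_map]
  exact PySem.List.foldl_congr_mem _ _ _ _ (fun ans x hx =>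
    pvInner_eq x (PySem.List.mem_pyRange_one.mp hx).1 d ans)
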